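-- pv_equiv track=rewrite | github.com/rejuve-bio/biocypher-kg | scripts/download_and_sample.py | sample_uniprot_records
-- ===== SOURCE A (Python) =====
-- from typing import Callable, Dict, Iterator, List, Optional, Tuple
--
-- def sample_uniprot_records(lines_iter: Iterator[str], limit: int) -> Iterator[str]:
--     """Sample complete UniProt records (from ID to //)."""
--     current_record = []
--     records_sampled = 0
--     for line in lines_iter:
--         current_record.append(line)
--         if line.strip() == "//":
--             if records_sampled < limit:
--                 yield from current_record
--                 records_sampled += 1
--                 if records_sampled >= limit:
--                     break
--             current_record = []
-- ===== SOURCE B (Python) =====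
-- def sample_uniprot_records(lines_iter, limit):
--     """Sample complete UniProt records (from ID to //).
--
--     Two-stage decomposition: an inner generator groups the line stream into
--     complete records; the outer loop concatenates the first `limit` records.
--     Return value matches A; iterator-consumption side effects may differ
--     (for limit <= 0, A drains the whole iterator; B stops early).
--     """
--     def records(it):
--         buf = []
--         for line in it:
--             buf.append(line)
--             if line.strip() == "//":
--                 yield buf
--                 buf = []
--     out = []
--     for i, rec in enumerate(records(lines_iter)):
--         if i >= limit:
--             break
--         out.extend(rec)
--     yield from out
-- ===== Notes on version B (the rewrite author's own statement) =====
-- stated objective: alternative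
-- what changed: Replaces A's single stateful loop (record buffer + sampled counter + nested break logic) with a two-stage pipeline: an inner generator that groups lines into complete records, and an outer enumerate loop that concatenates the first limit records; return-value equivalent, iterator-consumption side effects may differ (B stops early when limit <= 0).
import Mathlib
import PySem

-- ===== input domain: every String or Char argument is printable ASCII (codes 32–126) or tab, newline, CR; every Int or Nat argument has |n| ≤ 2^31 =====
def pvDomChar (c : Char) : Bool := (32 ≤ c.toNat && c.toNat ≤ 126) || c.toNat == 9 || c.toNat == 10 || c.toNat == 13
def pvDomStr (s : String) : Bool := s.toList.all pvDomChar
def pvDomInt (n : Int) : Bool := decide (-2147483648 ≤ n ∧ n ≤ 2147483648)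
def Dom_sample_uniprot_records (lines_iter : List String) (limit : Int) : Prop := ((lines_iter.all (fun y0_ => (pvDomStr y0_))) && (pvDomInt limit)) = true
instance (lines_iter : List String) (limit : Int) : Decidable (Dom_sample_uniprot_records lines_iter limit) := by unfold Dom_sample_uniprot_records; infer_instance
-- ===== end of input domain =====

-- B replaces A's single stateful loop with a records-grouping pass followed by a take-first-limit
-- concatenation (objective: alternative decomposition). Equivalence is about the RETURN value only:
-- as a Python generator, A drains the whole iterator when limit <= 0 while B stops early.

-- ===== PORT A =====
-- A's loop: state = (current_record, records_sampled); break encoded by returning without recursing.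
def sampleA_go (limit : Int) : List String → List String → Int → List String
  | [], _, _ => []
  | line :: rest, cur, sampled =>
    let cur := cur ++ [line]
    if PySem.Str.strip line == "//" then
      if sampled < limit then
        if limit ≤ sampled + 1 then cur
        else cur ++ sampleA_go limit rest [] (sampled + 1)
      else sampleA_go limit rest [] sampled
    else sampleA_go limit rest cur sampled

def sample_uniprot_records (lines_iter : List String) (limit : Int) : List String :=
  sampleA_go limit lines_iter [] 0

-- ===== PORT B =====
-- inner generator: group lines into complete records (trailing partial record dropped)
def sampleB_records : List String → List String → List (List String)
  | [], _ => []
  | line :: rest, buf =>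
    let buf := buf ++ [line]
    if PySem.Str.strip line == "//" then buf :: sampleB_records rest []
    else sampleB_records rest buf

-- outer loop: for i, rec in enumerate(records): if i >= limit: break; out.extend(rec)
def sampleB_take (limit : Int) : List (List String) → Int → List String
  | [], _ => []
  | rec :: rs, i => if limit ≤ i then [] else rec ++ sampleB_take limit rs (i + 1)

def sample_uniprot_records_alt (lines_iter : List String) (limit : Int) : List String :=
  sampleB_take limit (sampleB_records lines_iter []) 0

-- ===== PRECONDITION & SPEC =====
def Spec_sample_uniprot_records (lines_iter : List String) (limit : Int) (out : List String) : Prop := out = sample_uniprot_records_alt lines_iter limit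
instance (lines_iter : List String) (limit : Int) (out : List String) : Decidable (Spec_sample_uniprot_records lines_iter limit out) := by unfold Spec_sample_uniprot_records; infer_instance

-- ===== CLAIM (what is proved, stated in full; the proofs are below) =====
def Claim_equal_sample_uniprot_records : Prop := ∀ (lines_iter : List String) (limit : Int), Dom_sample_uniprot_records lines_iter limit → Spec_sample_uniprot_records lines_iter limit (sample_uniprot_records lines_iter limit)

-- ===== LEMMAS AND PROOFS =====
theorem sampleB_take_of_le (limit : Int) (rs : List (List String)) (i : Int)
    (h : limit ≤ i) : sampleB_take limit rs i = [] := by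
  cases rs with
  | nil => rfl
  | cons r rs => simp [sampleB_take, h]

theorem sampleA_go_eq (limit : Int) (lines : List String) :
    ∀ (cur : List String) (sampled : Int),
      sampleA_go limit lines cur sampled = sampleB_take limit (sampleB_records lines cur) sampled := by
  induction lines with
  | nil => intro cur sampled; rfl
  | cons line rest ih =>
    intro cur sampled
    by_cases hs : PySem.Str.strip line == "//"
    · by_cases hlt : sampled < limit
      · by_cases hend : limit ≤ sampled + 1
        · simp [sampleA_go, sampleB_records, sampleB_take, hs, hlt, hend,
            not_le.mpr hlt, sampleB_take_of_le limit _ _ hend]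
        · simp [sampleA_go, sampleB_records, sampleB_take, hs, hlt, hend,
            not_le.mpr hlt, ih]
      · have hle : limit ≤ sampled := not_lt.mp hlt
        simp [sampleA_go, sampleB_records, sampleB_take, hs, hlt, hle, ih,
          sampleB_take_of_le limit _ _ hle]
    · simp [sampleA_go, sampleB_records, hs, ih]

-- ===== VERDICT (by name: the statement is the Claim_ definition above) =====
theorem sample_uniprot_records_spec : Claim_equal_sample_uniprot_records := by
  intro lines limit _
  unfold Spec_sample_uniprot_records sample_uniprot_records sample_uniprot_records_alt
  exact sampleA_go_eq limit lines [] 0
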